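-- pv_equiv track=rewrite | github.com/Ualabi/Past_Google_Code_Jam | 2020/Round B/1 Expogo.py | solve
-- ===== SOURCE A (Python) =====
-- def solve(x,y,h):
--     if x == 0 and y == 0:
--         return ""
--     if (abs(x)%2 == abs(y)%2):
--         return "IMPOSSIBLE"
--     if (h >= 50):
--         return "IMPOSSIBLE"
--     if (x%2 == 0):
--         x = x//2
--         can = [[(y-1)//2, 'N'], [(y+1)//2, 'S']]
--         for t in can:
--             if (x == 0 and t[0] == 0):
--                 to = t
--                 break
--             if (abs(x)%2 != abs(t[0])%2):
--                 to = t
--         ans = solve(x, to[0], h+1)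
--         if (ans == "IMPOSSIBLE"):
--             return ans
--         ans = to[1] + ans
--         return ans
--     if (y%2 == 0):
--         y = y//2
--         can = [[(x-1)//2, 'E'], [(x+1)//2, 'W']]
--         for t in can:
--             if (y == 0 and t[0] == 0):
--                 to = t
--                 break
--             if (abs(y) % 2 != abs(t[0]) % 2):
--                 to = t
--         ans = solve(to[0], y, h+1)
--         if (ans == "IMPOSSIBLE"):
--             return ans
--         ans = to[1] + ans
--         return ans
--     return ""
-- ===== SOURCE B (Python) =====
-- def solve(x, y, h):
--     if x == 0 and y == 0:
--         return ""
--     out = []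
--     while True:
--         if abs(x) % 2 == abs(y) % 2 or h >= 50:
--             return "IMPOSSIBLE"
--         if abs(x) + abs(y) == 1:
--             out.append('E' if x == 1 else 'W' if x == -1 else 'N' if y == 1 else 'S')
--             return ''.join(out)
--         if x % 2 == 0:
--             t0 = (y - 1) // 2
--             x //= 2
--             if (t0 + x) % 2 != 0:
--                 y = t0
--                 out.append('N')
--             else:
--                 y = t0 + 1
--                 out.append('S')
--         else:
--             t0 = (x - 1) // 2
--             y //= 2
--             if (t0 + y) % 2 != 0:
--                 x = t0
--                 out.append('E')
--             else:
--                 x = t0 + 1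
--                 out.append('W')
--         h += 1
-- ===== Notes on version B (the rewrite author's own statement) =====
-- stated objective: alternative
-- what changed: Replaced A's recursion (with string prepending, IMPOSSIBLE propagation and a two-candidate 'for t in can' selection loop) by an iterative while loop that appends to an accumulator and picks each jump direction with a single parity test plus an explicit final-step case.
import Mathlib
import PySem

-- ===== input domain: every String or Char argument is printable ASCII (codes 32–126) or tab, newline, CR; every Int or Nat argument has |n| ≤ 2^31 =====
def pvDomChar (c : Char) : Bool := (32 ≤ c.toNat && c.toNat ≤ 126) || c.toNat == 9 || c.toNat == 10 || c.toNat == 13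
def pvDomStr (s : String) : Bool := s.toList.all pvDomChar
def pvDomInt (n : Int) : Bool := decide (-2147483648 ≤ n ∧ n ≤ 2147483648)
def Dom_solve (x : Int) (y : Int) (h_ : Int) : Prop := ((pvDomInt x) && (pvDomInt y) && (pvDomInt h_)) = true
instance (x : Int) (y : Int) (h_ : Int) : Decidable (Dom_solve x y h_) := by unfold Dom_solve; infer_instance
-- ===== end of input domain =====

-- B replaces A's recursion (and its two-candidate 'for t in can' selection loop) by an
-- iterative accumulator loop that picks each jump direction with a single parity test
-- (objective: alternative decomposition; same return value everywhere).

-- ===== PORT A =====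
-- the 'for t in can' selection loop of A (last match wins, break on the x==0/t==0 case);
-- the Option state is the Python variable 'to' (none = not yet bound)
def pickTo (z : Int) : List (Int × Char) → Option (Int × Char) → Option (Int × Char)
  | [], to? => to?
  | t :: rest, to? =>
    if z = 0 ∧ t.1 = 0 then some t
    else if PySem.Int.mod |z| 2 ≠ PySem.Int.mod |t.1| 2 then pickTo z rest (some t)
    else pickTo z rest to?

def solve (x : Int) (y : Int) (h_ : Int) : String :=
  if x = 0 ∧ y = 0 then ""
  else if PySem.Int.mod |x| 2 = PySem.Int.mod |y| 2 then "IMPOSSIBLE"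
  else if _h50 : 50 ≤ h_ then "IMPOSSIBLE"
  else if PySem.Int.mod x 2 = 0 then
    let x' := PySem.Int.floordiv x 2
    match pickTo x' [(PySem.Int.floordiv (y - 1) 2, 'N'), (PySem.Int.floordiv (y + 1) 2, 'S')] none with
    | none => ""   -- Python would raise NameError here; unreachable (the two candidates have opposite parity)
    | some t =>
      let ans := solve x' t.1 (h_ + 1)
      if ans = "IMPOSSIBLE" then ans else String.ofList (t.2 :: ans.toList)
  else if PySem.Int.mod y 2 = 0 then
    let y' := PySem.Int.floordiv y 2
    match pickTo y' [(PySem.Int.floordiv (x - 1) 2, 'E'), (PySem.Int.floordiv (x + 1) 2, 'W')] none with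
    | none => ""   -- unreachable, as above
    | some t =>
      let ans := solve t.1 y' (h_ + 1)
      if ans = "IMPOSSIBLE" then ans else String.ofList (t.2 :: ans.toList)
  else ""
termination_by (50 - h_).toNat
decreasing_by all_goals omega

-- ===== PORT B =====
-- the while-loop of Source B; 'acc' is the list 'out'
def solveLoop (x : Int) (y : Int) (h_ : Int) (acc : List Char) : String :=
  if PySem.Int.mod |x| 2 = PySem.Int.mod |y| 2 ∨ 50 ≤ h_ then "IMPOSSIBLE"
  else if |x| + |y| = 1 then
    String.ofList (acc ++ [if x = 1 then 'E' else if x = -1 then 'W' else if y = 1 then 'N' else 'S'])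
  else if PySem.Int.mod x 2 = 0 then
    let t0 := PySem.Int.floordiv (y - 1) 2
    let x2 := PySem.Int.floordiv x 2
    if PySem.Int.mod (t0 + x2) 2 ≠ 0 then solveLoop x2 t0 (h_ + 1) (acc ++ ['N'])
    else solveLoop x2 (t0 + 1) (h_ + 1) (acc ++ ['S'])
  else
    let t0 := PySem.Int.floordiv (x - 1) 2
    let y2 := PySem.Int.floordiv y 2
    if PySem.Int.mod (t0 + y2) 2 ≠ 0 then solveLoop t0 y2 (h_ + 1) (acc ++ ['E'])
    else solveLoop (t0 + 1) y2 (h_ + 1) (acc ++ ['W'])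
termination_by (50 - h_).toNat
decreasing_by all_goals omega

def solve_alt (x : Int) (y : Int) (h_ : Int) : String :=
  if x = 0 ∧ y = 0 then "" else solveLoop x y h_ []

-- ===== PRECONDITION & SPEC =====
def Spec_solve (x : Int) (y : Int) (h_ : Int) (out : String) : Prop := out = solve_alt x y h_
instance (x : Int) (y : Int) (h_ : Int) (out : String) : Decidable (Spec_solve x y h_ out) := by unfold Spec_solve; infer_instance

-- ===== CLAIM (what is proved, stated in full; the proofs are below) =====
def Claim_equal_solve : Prop := ∀ (x : Int) (y : Int) (h_ : Int), Dom_solve x y h_ → Spec_solve x y h_ (solve x y h_)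

-- ===== LEMMAS AND PROOFS =====

lemma mod2 (a : Int) : PySem.Int.mod a 2 = a % 2 := PySem.Int.mod_eq_emod_of_pos (by norm_num)
lemma fd2 (a : Int) : PySem.Int.floordiv a 2 = a / 2 := PySem.Int.floordiv_eq_ediv_of_pos (by norm_num)
lemma abs_mod2 (a : Int) : |a| % 2 = a % 2 := by
  rcases abs_cases a with ⟨h, _⟩ | ⟨h, _⟩ <;> omega
lemma pmod2_abs (a : Int) : PySem.Int.mod |a| 2 = a % 2 := by rw [mod2, abs_mod2]

lemma solve_zero (h_ : Int) : solve 0 0 h_ = "" := by rw [solve]; simp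

lemma ofList_cons_ne_IMP (c : Char) (l : List Char) (hc : c ≠ 'I') :
    String.ofList (c :: l) ≠ "IMPOSSIBLE" := by
  intro h
  have h2c := congrArg String.toList h
  rw [String.toList_ofList] at h2c
  have h3 : ("IMPOSSIBLE" : String).toList = 'I' :: ['M','P','O','S','S','I','B','L','E'] := by decide
  rw [h3] at h2c
  exact hc (List.cons.injEq _ _ _ _ ▸ h2c).1

lemma solve_unit_N (h_ : Int) (h50 : ¬ 50 ≤ h_) : solve 0 1 h_ = "N" := by
  rw [solve, if_neg (by norm_num), if_neg (by decide), dif_neg h50, if_pos (by decide)]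
  norm_num [pickTo, solve_zero]
  decide

lemma solve_unit_S (h_ : Int) (h50 : ¬ 50 ≤ h_) : solve 0 (-1) h_ = "S" := by
  rw [solve, if_neg (by norm_num), if_neg (by decide), dif_neg h50, if_pos (by decide)]
  norm_num [pickTo, solve_zero]
  decide

lemma solve_unit_E (h_ : Int) (h50 : ¬ 50 ≤ h_) : solve 1 0 h_ = "E" := by
  rw [solve, if_neg (by norm_num), if_neg (by decide), dif_neg h50, if_neg (by decide),
    if_pos (by decide)]
  norm_num [pickTo, solve_zero]
  decide

lemma solve_unit_W (h_ : Int) (h50 : ¬ 50 ≤ h_) : solve (-1) 0 h_ = "W" := by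
  rw [solve, if_neg (by norm_num), if_neg (by decide), dif_neg h50, if_neg (by decide),
    if_pos (by decide)]
  norm_num [pickTo, solve_zero]
  decide

lemma loop_eq : ∀ (n : Nat) (x y h_ : Int) (acc : List Char), (50 - h_).toNat ≤ n → ¬(x = 0 ∧ y = 0) →
    solveLoop x y h_ acc =
      if solve x y h_ = "IMPOSSIBLE" then "IMPOSSIBLE"
      else String.ofList (acc ++ (solve x y h_).toList) := by
  intro n
  induction n with
  | zero =>
    intro x y h_ acc hn hxy
    have h50 : 50 ≤ h_ := by omega
    have hA : solve x y h_ = "IMPOSSIBLE" := by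
      rw [solve, if_neg hxy]
      split_ifs with h1
      · rfl
      · rfl
    rw [solveLoop, if_pos (Or.inr h50), hA, if_pos rfl]
  | succ n ih =>
    intro x y h_ acc hn hxy
    by_cases hpar : PySem.Int.mod |x| 2 = PySem.Int.mod |y| 2
    · have hA : solve x y h_ = "IMPOSSIBLE" := by rw [solve, if_neg hxy, if_pos hpar]
      rw [solveLoop, if_pos (Or.inl hpar), hA, if_pos rfl]
    by_cases h50 : 50 ≤ h_
    · have hA : solve x y h_ = "IMPOSSIBLE" := by
        rw [solve, if_neg hxy, if_neg hpar, dif_pos h50]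
      rw [solveLoop, if_pos (Or.inr h50), hA, if_pos rfl]
    have hn' : (50 - (h_ + 1)).toNat ≤ n := by omega
    have hpar' : x % 2 ≠ y % 2 := by
      have h := hpar; rw [pmod2_abs, pmod2_abs] at h; exact h
    by_cases hone : |x| + |y| = 1
    · -- last jump: one of the four unit states
      rw [solveLoop, if_neg (by tauto), if_pos hone]
      have h4 : (x = 1 ∧ y = 0) ∨ (x = -1 ∧ y = 0) ∨ (x = 0 ∧ y = 1) ∨ (x = 0 ∧ y = -1) := by
        rcases abs_cases x with ⟨hx, _⟩ | ⟨hx, _⟩ <;> rcases abs_cases y with ⟨hy, _⟩ | ⟨hy, _⟩ <;> omega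
      rcases h4 with ⟨hx, hy⟩ | ⟨hx, hy⟩ | ⟨hx, hy⟩ | ⟨hx, hy⟩ <;> subst hx <;> subst hy
      · rw [solve_unit_E h_ h50, if_neg (show ¬("E" : String) = "IMPOSSIBLE" by decide)]
        simp only [show ("E" : String).toList = ['E'] from by decide]; norm_num
      · rw [solve_unit_W h_ h50, if_neg (show ¬("W" : String) = "IMPOSSIBLE" by decide)]
        simp only [show ("W" : String).toList = ['W'] from by decide]; norm_num
      · rw [solve_unit_N h_ h50, if_neg (show ¬("N" : String) = "IMPOSSIBLE" by decide)]
        simp only [show ("N" : String).toList = ['N'] from by decide]; norm_num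
      · rw [solve_unit_S h_ h50, if_neg (show ¬("S" : String) = "IMPOSSIBLE" by decide)]
        simp only [show ("S" : String).toList = ['S'] from by decide]; norm_num
    · -- general jump
      by_cases hxe : PySem.Int.mod x 2 = 0
      · -- x even, y odd: the N/S branch
        have hxe' : x % 2 = 0 := by rw [← mod2]; exact hxe
        have hyodd : y % 2 = 1 := by omega
        set t0 := PySem.Int.floordiv (y - 1) 2 with ht0
        set x2 := PySem.Int.floordiv x 2 with hx2
        have hxv : x = 2 * x2 := by rw [hx2, fd2]; omega
        have ht0v : y = 2 * t0 + 1 := by rw [ht0, fd2]; omega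
        have ht1 : PySem.Int.floordiv (y + 1) 2 = t0 + 1 := by rw [ht0, fd2, fd2]; omega
        have hnb0 : ¬(x2 = 0 ∧ t0 = 0) := by
          rintro ⟨h1, h2⟩; apply hone; rw [hxv, ht0v, h1, h2]; norm_num
        have hnb1 : ¬(x2 = 0 ∧ t0 + 1 = 0) := by
          rintro ⟨h1, h2⟩; apply hone
          rw [hxv, ht0v, h1, show t0 = -1 by omega]; norm_num
        by_cases hsel : PySem.Int.mod (t0 + x2) 2 ≠ 0
        · have hsel' : (t0 + x2) % 2 ≠ 0 := by rw [← mod2]; exact hsel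
          have hp0 : PySem.Int.mod |x2| 2 ≠ PySem.Int.mod |t0| 2 := by
            rw [pmod2_abs, pmod2_abs]; omega
          have hp1 : ¬ PySem.Int.mod |x2| 2 ≠ PySem.Int.mod |t0 + 1| 2 := by
            rw [pmod2_abs, pmod2_abs]; omega
          have hpick : pickTo x2 [(t0, 'N'), (PySem.Int.floordiv (y + 1) 2, 'S')] none
              = some (t0, 'N') := by
            rw [ht1]; simp only [pickTo, if_neg hnb0, if_neg hnb1, if_pos hp0, if_neg hp1]
          have hA : solve x y h_ =
              if solve x2 t0 (h_ + 1) = "IMPOSSIBLE" then solve x2 t0 (h_ + 1)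
              else String.ofList ('N' :: (solve x2 t0 (h_ + 1)).toList) := by
            rw [solve, if_neg hxy, if_neg hpar, dif_neg h50, if_pos hxe]
            simp only [← hx2, ← ht0, hpick]
          have hB : solveLoop x y h_ acc = solveLoop x2 t0 (h_ + 1) (acc ++ ['N']) := by
            rw [solveLoop, if_neg (by tauto), if_neg hone, if_pos hxe]
            simp only [← hx2, ← ht0]; rw [if_pos hsel]
          rw [hB, hA, ih x2 t0 (h_ + 1) (acc ++ ['N']) hn' hnb0]
          by_cases himp : solve x2 t0 (h_ + 1) = "IMPOSSIBLE"
          · simp [himp]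
          · rw [if_neg himp, if_neg himp,
              if_neg (ofList_cons_ne_IMP 'N' (solve x2 t0 (h_ + 1)).toList (by decide)),
              String.toList_ofList]
            simp
        · simp only [ne_eq, not_not] at hsel
          have hsel' : (t0 + x2) % 2 = 0 := by rw [← mod2]; exact hsel
          have hp0 : ¬ PySem.Int.mod |x2| 2 ≠ PySem.Int.mod |t0| 2 := by
            rw [pmod2_abs, pmod2_abs]; omega
          have hp1 : PySem.Int.mod |x2| 2 ≠ PySem.Int.mod |t0 + 1| 2 := by
            rw [pmod2_abs, pmod2_abs]; omega
          have hpick : pickTo x2 [(t0, 'N'), (PySem.Int.floordiv (y + 1) 2, 'S')] none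
              = some (t0 + 1, 'S') := by
            rw [ht1]; simp only [pickTo, if_neg hnb0, if_neg hnb1, if_neg hp0, if_pos hp1]
          have hA : solve x y h_ =
              if solve x2 (t0 + 1) (h_ + 1) = "IMPOSSIBLE" then solve x2 (t0 + 1) (h_ + 1)
              else String.ofList ('S' :: (solve x2 (t0 + 1) (h_ + 1)).toList) := by
            rw [solve, if_neg hxy, if_neg hpar, dif_neg h50, if_pos hxe]
            simp only [← hx2, ← ht0, hpick]
          have hB : solveLoop x y h_ acc = solveLoop x2 (t0 + 1) (h_ + 1) (acc ++ ['S']) := by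
            rw [solveLoop, if_neg (by tauto), if_neg hone, if_pos hxe]
            simp only [← hx2, ← ht0]
            rw [if_neg (show ¬ PySem.Int.mod (t0 + x2) 2 ≠ 0 by simpa using hsel)]
          rw [hB, hA, ih x2 (t0 + 1) (h_ + 1) (acc ++ ['S']) hn' hnb1]
          by_cases himp : solve x2 (t0 + 1) (h_ + 1) = "IMPOSSIBLE"
          · simp [himp]
          · rw [if_neg himp, if_neg himp,
              if_neg (ofList_cons_ne_IMP 'S' (solve x2 (t0 + 1) (h_ + 1)).toList (by decide)),
              String.toList_ofList]
            simp
      · -- x odd, y even: the E/W branch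
        have hxo : x % 2 = 1 := by
          have h := hxe; rw [mod2] at h; omega
        have hye' : y % 2 = 0 := by omega
        have hye : PySem.Int.mod y 2 = 0 := by rw [mod2]; exact hye'
        set t0 := PySem.Int.floordiv (x - 1) 2 with ht0
        set y2 := PySem.Int.floordiv y 2 with hy2
        have hyv : y = 2 * y2 := by rw [hy2, fd2]; omega
        have ht0v : x = 2 * t0 + 1 := by rw [ht0, fd2]; omega
        have ht1 : PySem.Int.floordiv (x + 1) 2 = t0 + 1 := by rw [ht0, fd2, fd2]; omega
        have hnb0 : ¬(y2 = 0 ∧ t0 = 0) := by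
          rintro ⟨h1, h2⟩; apply hone; rw [hyv, ht0v, h1, h2]; norm_num
        have hnb1 : ¬(y2 = 0 ∧ t0 + 1 = 0) := by
          rintro ⟨h1, h2⟩; apply hone
          rw [hyv, ht0v, h1, show t0 = -1 by omega]; norm_num
        by_cases hsel : PySem.Int.mod (t0 + y2) 2 ≠ 0
        · have hsel' : (t0 + y2) % 2 ≠ 0 := by rw [← mod2]; exact hsel
          have hp0 : PySem.Int.mod |y2| 2 ≠ PySem.Int.mod |t0| 2 := by
            rw [pmod2_abs, pmod2_abs]; omega
          have hp1 : ¬ PySem.Int.mod |y2| 2 ≠ PySem.Int.mod |t0 + 1| 2 := by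
            rw [pmod2_abs, pmod2_abs]; omega
          have hpick : pickTo y2 [(t0, 'E'), (PySem.Int.floordiv (x + 1) 2, 'W')] none
              = some (t0, 'E') := by
            rw [ht1]; simp only [pickTo, if_neg hnb0, if_neg hnb1, if_pos hp0, if_neg hp1]
          have hA : solve x y h_ =
              if solve t0 y2 (h_ + 1) = "IMPOSSIBLE" then solve t0 y2 (h_ + 1)
              else String.ofList ('E' :: (solve t0 y2 (h_ + 1)).toList) := by
            rw [solve, if_neg hxy, if_neg hpar, dif_neg h50, if_neg hxe, if_pos hye]
            simp only [← hy2, ← ht0, hpick]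
          have hB : solveLoop x y h_ acc = solveLoop t0 y2 (h_ + 1) (acc ++ ['E']) := by
            rw [solveLoop, if_neg (by tauto), if_neg hone, if_neg hxe]
            simp only [← hy2, ← ht0]; rw [if_pos hsel]
          rw [hB, hA, ih t0 y2 (h_ + 1) (acc ++ ['E']) hn'
            (by rintro ⟨h1, h2⟩; exact hnb0 ⟨h2, h1⟩)]
          by_cases himp : solve t0 y2 (h_ + 1) = "IMPOSSIBLE"
          · simp [himp]
          · rw [if_neg himp, if_neg himp,
              if_neg (ofList_cons_ne_IMP 'E' (solve t0 y2 (h_ + 1)).toList (by decide)),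
              String.toList_ofList]
            simp
        · simp only [ne_eq, not_not] at hsel
          have hsel' : (t0 + y2) % 2 = 0 := by rw [← mod2]; exact hsel
          have hp0 : ¬ PySem.Int.mod |y2| 2 ≠ PySem.Int.mod |t0| 2 := by
            rw [pmod2_abs, pmod2_abs]; omega
          have hp1 : PySem.Int.mod |y2| 2 ≠ PySem.Int.mod |t0 + 1| 2 := by
            rw [pmod2_abs, pmod2_abs]; omega
          have hpick : pickTo y2 [(t0, 'E'), (PySem.Int.floordiv (x + 1) 2, 'W')] none
              = some (t0 + 1, 'W') := by
            rw [ht1]; simp only [pickTo, if_neg hnb0, if_neg hnb1, if_neg hp0, if_pos hp1]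
          have hA : solve x y h_ =
              if solve (t0 + 1) y2 (h_ + 1) = "IMPOSSIBLE" then solve (t0 + 1) y2 (h_ + 1)
              else String.ofList ('W' :: (solve (t0 + 1) y2 (h_ + 1)).toList) := by
            rw [solve, if_neg hxy, if_neg hpar, dif_neg h50, if_neg hxe, if_pos hye]
            simp only [← hy2, ← ht0, hpick]
          have hB : solveLoop x y h_ acc = solveLoop (t0 + 1) y2 (h_ + 1) (acc ++ ['W']) := by
            rw [solveLoop, if_neg (by tauto), if_neg hone, if_neg hxe]
            simp only [← hy2, ← ht0]
            rw [if_neg (show ¬ PySem.Int.mod (t0 + y2) 2 ≠ 0 by simpa using hsel)]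
          rw [hB, hA, ih (t0 + 1) y2 (h_ + 1) (acc ++ ['W']) hn'
            (by rintro ⟨h1, h2⟩; exact hnb1 ⟨h2, h1⟩)]
          by_cases himp : solve (t0 + 1) y2 (h_ + 1) = "IMPOSSIBLE"
          · simp [himp]
          · rw [if_neg himp, if_neg himp,
              if_neg (ofList_cons_ne_IMP 'W' (solve (t0 + 1) y2 (h_ + 1)).toList (by decide)),
              String.toList_ofList]
            simp

-- ===== VERDICT (by name: the statement is the Claim_ definition above) =====
theorem solve_spec : Claim_equal_solve := by
  intro x y h_ _hd
  unfold Spec_solve solve_alt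
  by_cases hxy : x = 0 ∧ y = 0
  · obtain ⟨hx, hy⟩ := hxy; subst hx; subst hy
    simp [solve_zero]
  · rw [if_neg hxy, loop_eq (50 - h_).toNat x y h_ [] le_rfl hxy]
    by_cases himp : solve x y h_ = "IMPOSSIBLE"
    · rw [if_pos himp, himp]
    · rw [if_neg himp]; simp [String.ofList_toList]
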